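-- pv_equiv track=rewrite | github.com/kjahaj/DynamicProgramming-Vs-GreedyApproach | Max Study Hours Problem/StudyHoursGreedy.py | MSM_Greedy
-- ===== SOURCE A (Python) =====
-- def MSM_Greedy(E):
--     n, H = len(E), len(E[0])-1
--     A = [[0 for _ in range(H+1)] for _ in range(n+1)]
--     M = [[0 for _ in range(H+1)] for _ in range(n+1)]
--     # ground cases
--     for h in range(H+1):
--         M[0][h] = 0
--     # recurrence cases
--     for k in range(1, n+1):
--         for h in range(H+1):
--             max_e = -1
--             max_hprime = 0
--             for hprime in range(h+1):
--                 if E[k-1][hprime] > max_e: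
--                     max_e = E[k-1][hprime]
--                     max_hprime = hprime
--             M[k][h] = max_e + M[k-1][h-max_hprime]
--             A[k][h] = max_hprime
--     return max(max(M, key=lambda row: max(row)))
-- ===== SOURCE B (Python) =====
-- def MSM_Greedy(E):
--     Hp1 = len(E[0])
--     prev = [0] * Hp1
--     best = 0
--     for row in E:
--         max_e, max_h = -1, 0
--         cur = []
--         for h in range(Hp1):
--             if row[h] > max_e:
--                 max_e, max_h = row[h], h
--             v = max_e + prev[h - max_h]
--             cur.append(v)
--             if v > best:
--                 best = v
--         prev = cur
--     return best
-- ===== Notes on version B (the rewrite author's own statement) =====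
-- stated objective: faster
-- what changed: B replaces A's per-cell rescan of E[k-1][0..h] (and the n x (H+1) tables) by a single left-to-right pass per row that maintains the running prefix max/argmax and a running global best, keeping only the previous DP row.
import Mathlib
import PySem

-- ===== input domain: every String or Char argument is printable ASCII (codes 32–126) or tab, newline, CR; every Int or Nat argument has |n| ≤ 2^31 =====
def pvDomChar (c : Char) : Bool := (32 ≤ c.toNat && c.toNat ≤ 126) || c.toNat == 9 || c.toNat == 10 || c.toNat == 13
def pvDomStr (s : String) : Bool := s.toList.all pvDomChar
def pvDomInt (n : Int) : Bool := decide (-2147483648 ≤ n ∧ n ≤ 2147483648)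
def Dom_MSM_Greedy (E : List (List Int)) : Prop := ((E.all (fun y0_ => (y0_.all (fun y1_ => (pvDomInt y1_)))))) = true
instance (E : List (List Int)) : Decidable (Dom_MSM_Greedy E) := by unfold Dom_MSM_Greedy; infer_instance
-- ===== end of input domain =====

-- B replaces A's per-cell rescan of the row prefix by one incremental prefix-max pass per row
-- (O(n*H) instead of O(n*H^2)), keeping only the previous DP row and a running global best.

-- ===== PORT A =====
-- the inner `for hprime in range(h+1)` rescan (max_e, max_hprime run)
def aScanStep (row : List Int) (p : Int × Nat) (hp : Nat) : Int × Nat :=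
  if (PySem.List.pyGet? row (hp : Int)).getD 0 > p.1
  then ((PySem.List.pyGet? row (hp : Int)).getD 0, hp) else p

def aScan (row : List Int) (h : Nat) : Int × Nat :=
  (List.range (h + 1)).foldl (aScanStep row) (-1, 0)

-- M[k][h] = max_e + M[k-1][h - max_hprime]
def aEntry (row prev : List Int) (h : Nat) : Int :=
  (aScan row h).1 + (PySem.List.pyGet? prev ((h : Int) - ((aScan row h).2 : Int))).getD 0

def aRow (Hp1 : Nat) (row prev : List Int) : List Int :=
  (List.range Hp1).map (aEntry row prev)

-- rows M[1..n], each built from the previous one (the unused argmax table A of the Python is dead code and omitted)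
def aRows (Hp1 : Nat) (rows : List (List Int)) (prev : List Int) : List (List Int) :=
  match rows with
  | [] => []
  | r :: rs => aRow Hp1 r prev :: aRows Hp1 rs (aRow Hp1 r prev)

-- lambda row: max(row)
def aKey (r : List Int) : Int := (PySem.List.max? r (fun x => x)).getD 0

def MSM_Greedy (E : List (List Int)) : Int :=
  let Hp1 := (E.headD []).length
  let M0 := List.replicate Hp1 (0 : Int)
  let M := M0 :: aRows Hp1 E M0
  match PySem.List.max? M aKey with
  | some r => (PySem.List.max? r (fun x => x)).getD 0
  | none => 0

-- ===== PORT B =====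
-- one pass over h: running (max_e, max_h), the row being built, and the running global best
def bStep (row prev : List Int) (q : (Int × Nat) × List Int × Int) (h : Nat) : (Int × Nat) × List Int × Int :=
  let e := (PySem.List.pyGet? row (h : Int)).getD 0
  let p := if e > q.1.1 then (e, h) else q.1
  let v := p.1 + (PySem.List.pyGet? prev ((h : Int) - (p.2 : Int))).getD 0
  (p, q.2.1 ++ [v], if v > q.2.2 then v else q.2.2)

def bOuter (Hp1 : Nat) (st : List Int × Int) (row : List Int) : List Int × Int :=
  let q := (List.range Hp1).foldl (bStep row st.1) ((-1, 0), [], st.2)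
  (q.2.1, q.2.2)

def MSM_Greedy_alt (E : List (List Int)) : Int :=
  let Hp1 := (E.headD []).length
  (E.foldl (bOuter Hp1) (List.replicate Hp1 (0 : Int), 0)).2

-- ===== PRECONDITION & SPEC =====
-- Pre_ excludes exactly the inputs on which the Python A raises: an empty input list or an empty first row
-- (IndexError / ValueError on max of an empty row), and rows shorter than the first row (IndexError).
def Pre_MSM_Greedy (E : List (List Int)) : Prop :=
  E ≠ [] ∧ 1 ≤ (E.headD []).length ∧ ∀ r ∈ E, (E.headD []).length ≤ r.length
instance (E : List (List Int)) : Decidable (Pre_MSM_Greedy E) := by unfold Pre_MSM_Greedy; infer_instance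
def pvWitness_MSM_Greedy : List (List Int) := [[1, 2], [3, 4]]

def Spec_MSM_Greedy (E : List (List Int)) (out : Int) : Prop := out = MSM_Greedy_alt E
instance (E : List (List Int)) (out : Int) : Decidable (Spec_MSM_Greedy E out) := by unfold Spec_MSM_Greedy; infer_instance

-- ===== CLAIM (what is proved, stated in full; the proofs are below) =====
def Claim_equal_MSM_Greedy : Prop := ∀ (E : List (List Int)), Dom_MSM_Greedy E → Pre_MSM_Greedy E → Spec_MSM_Greedy E (MSM_Greedy E)

-- ===== LEMMAS AND PROOFS =====

-- B's inner fold computes A's rescanned states, A's row entries, and a running max of the entries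
theorem bInner (row prev : List Int) (b0 : Int) (t : Nat) :
    (List.range t).foldl (bStep row prev) ((-1, 0), [], b0) =
      ((List.range t).foldl (aScanStep row) (-1, 0),
       (List.range t).map (aEntry row prev),
       (List.range t).foldl (fun b h => if aEntry row prev h > b then aEntry row prev h else b) b0) := by
  induction t with
  | zero => simp
  | succ t ih =>
    have hP : (List.range (t + 1)).foldl (aScanStep row) (-1, 0) = aScan row t := by
      simp [aScan]
    simp only [List.range_succ, List.foldl_append, List.map_append, List.foldl_cons,
      List.foldl_nil, List.map_cons, List.map_nil, ih]
    have : bStep row prev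
        ((List.range t).foldl (aScanStep row) (-1, 0),
         (List.range t).map (aEntry row prev),
         (List.range t).foldl (fun b h => if aEntry row prev h > b then aEntry row prev h else b) b0) t =
        ((List.range (t + 1)).foldl (aScanStep row) (-1, 0),
         (List.range t).map (aEntry row prev) ++ [aEntry row prev t],
         (fun b h => if aEntry row prev h > b then aEntry row prev h else b)
           ((List.range t).foldl (fun b h => if aEntry row prev h > b then aEntry row prev h else b) b0) t) := by
      have hstep : (List.range (t + 1)).foldl (aScanStep row) (-1, 0) =
          aScanStep row ((List.range t).foldl (aScanStep row) (-1, 0)) t := by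
        simp [List.range_succ, List.foldl_append]
      simp [bStep, aEntry, aScan, hstep, aScanStep]
    rw [this]
    simp [List.range_succ, List.foldl_append]

-- one B outer step = append A's next row, fold its entries into best
theorem bOuter_eq (Hp1 : Nat) (prev : List Int) (b : Int) (row : List Int) :
    bOuter Hp1 (prev, b) row = (aRow Hp1 row prev, (aRow Hp1 row prev).foldl max b) := by
  have hmax : ∀ (l : List Nat) (b : Int),
      l.foldl (fun b h => if aEntry row prev h > b then aEntry row prev h else b) b =
        (l.map (aEntry row prev)).foldl max b := by
    intro l
    induction l with
    | nil => intro b; simp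
    | cons x xs ih =>
      intro b
      simp only [List.foldl_cons, List.map_cons, ih]
      congr 1
      rcases lt_or_ge b (aEntry row prev x) with h | h
      · simp [h.le, h]
      · simp [h]
  simp [bOuter, bInner, aRow, hmax]

-- threading B's fold over all rows
theorem bFold (Hp1 : Nat) (rows : List (List Int)) (prev : List Int) (b : Int) :
    (rows.foldl (bOuter Hp1) (prev, b)).2 =
      (aRows Hp1 rows prev).foldl (fun acc r => r.foldl max acc) b := by
  induction rows generalizing prev b with
  | nil => simp [aRows]
  | cons r rs ih => simp [aRows, bOuter_eq, ih]

-- every row A builds has length Hp1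
theorem aRows_length (Hp1 : Nat) (rows : List (List Int)) (prev : List Int) :
    ∀ r ∈ aRows Hp1 rows prev, r.length = Hp1 := by
  induction rows generalizing prev with
  | nil => simp [aRows]
  | cons x xs ih =>
    intro r hr
    simp only [aRows, List.mem_cons] at hr
    rcases hr with h | h
    · simp [h, aRow]
    · exact ih _ r h

-- running max over a nonempty row, seeded from acc
theorem foldl_max_seed (t : List Int) : ∀ (a x : Int), t.foldl max (max a x) = max a (t.foldl max x) := by
  induction t with
  | nil => intro a x; simp
  | cons y ys ih =>
    intro a x
    simp only [List.foldl_cons]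
    rw [max_assoc]
    exact ih a (max x y)

-- max of a nonempty list as aKey
theorem aKey_cons (x : Int) (t : List Int) : aKey (x :: t) = t.foldl max x := by
  simp [aKey, PySem.List.max?_id_cons]

theorem foldl_max_attained (a x : Int) (l : List Int) (hx : x ∈ a :: l)
    (hub : ∀ y ∈ a :: l, y ≤ x) : l.foldl max a = x := by
  have h1 := PySem.List.le_foldl_max l a
  have h2 := PySem.List.foldl_max_mem l a
  have hle : l.foldl max a ≤ x := by
    rcases h2 with h | h
    · rw [h]; exact hub a (by simp)
    · exact hub _ (List.mem_cons_of_mem _ h)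
  have hge : x ≤ l.foldl max a := by
    rcases List.mem_cons.1 hx with h | h
    · rw [h]; exact h1.1
    · exact h1.2 _ h
  omega

theorem foldl_max_replicate (k : Nat) : (List.replicate k (0 : Int)).foldl max 0 = 0 := by
  induction k with
  | zero => simp
  | succ k ih => simp [List.replicate_succ, ih]

-- fold of row-folds = fold of row maxima, for rows of positive length
theorem foldl_rows_eq_keys (rows : List (List Int)) (hne : ∀ r ∈ rows, r ≠ []) :
    ∀ b : Int, rows.foldl (fun acc r => r.foldl max acc) b = (rows.map aKey).foldl max b := by
  induction rows with
  | nil => intro b; simp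
  | cons r rs ih =>
    intro b
    obtain ⟨x, t, rfl⟩ : ∃ x t, r = x :: t := by
      cases r with
      | nil => exact absurd rfl (hne [] (by simp))
      | cons x t => exact ⟨x, t, rfl⟩
    simp only [List.foldl_cons, List.map_cons]
    rw [foldl_max_seed, aKey_cons, ih (fun r hr => hne r (List.mem_cons_of_mem _ hr))]

-- the A-side return value equals the B-side fold, for a fixed Hp1 ≥ 1
theorem core (Hp1 : Nat) (E : List (List Int)) (h1 : 1 ≤ Hp1) :
    (match PySem.List.max? (List.replicate Hp1 (0 : Int) :: aRows Hp1 E (List.replicate Hp1 0)) aKey with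
     | some r => (PySem.List.max? r (fun x => x)).getD 0
     | none => 0) =
      (E.foldl (bOuter Hp1) (List.replicate Hp1 (0 : Int), 0)).2 := by
  set M0 := List.replicate Hp1 (0 : Int) with hM0
  set rest := aRows Hp1 E M0 with hrest
  have hlen : ∀ r ∈ rest, r.length = Hp1 := aRows_length Hp1 E M0
  have hne : ∀ r ∈ rest, r ≠ [] := by
    intro r hr h
    have := hlen r hr
    rw [h] at this
    simp at this
    omega
  have hB : (E.foldl (bOuter Hp1) (M0, 0)).2 = (rest.map aKey).foldl max 0 := by
    rw [bFold, foldl_rows_eq_keys rest hne]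
  have hkey0 : aKey M0 = 0 := by
    obtain ⟨k, hk⟩ : ∃ k, Hp1 = k + 1 := ⟨Hp1 - 1, by omega⟩
    rw [hM0, hk, List.replicate_succ, aKey_cons, foldl_max_replicate]
  obtain ⟨m, hm⟩ : ∃ m, PySem.List.max? (M0 :: rest) aKey = some m := by
    rcases h : PySem.List.max? (M0 :: rest) aKey with _ | m
    · rw [PySem.List.max?_eq_none_iff] at h; simp at h
    · exact ⟨m, rfl⟩
  have hmMem : m ∈ M0 :: rest := PySem.List.max?_mem hm
  have hmMax : ∀ y ∈ M0 :: rest, aKey y ≤ aKey m := PySem.List.max?_isMax hm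
  have hmne : m ≠ [] := by
    rcases List.mem_cons.1 hmMem with h | h
    · rw [h, hM0]; simp; omega
    · exact hne m h
  obtain ⟨x, t, rfl⟩ : ∃ x t, m = x :: t := by
    cases m with
    | nil => exact absurd rfl hmne
    | cons x t => exact ⟨x, t, rfl⟩
  rw [hm]
  have hkeys : (rest.map aKey).foldl max (aKey M0) = aKey (x :: t) := by
    apply foldl_max_attained
    · exact List.mem_map_of_mem hmMem
    · intro y hy
      rcases List.mem_cons.1 hy with h | h
      · rw [h]; exact hmMax M0 (by simp)
      · obtain ⟨r, hr, rfl⟩ := List.mem_map.1 h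
        exact hmMax r (List.mem_cons_of_mem _ hr)
  rw [hB, ← hkey0, hkeys, aKey_cons]
  simp [PySem.List.max?_id_cons]

-- ===== VERDICT (by name: the statement is the Claim_ definition above) =====
theorem MSM_Greedy_spec : Claim_equal_MSM_Greedy := by
  intro E _ hPre
  unfold Spec_MSM_Greedy
  exact core (E.headD []).length E hPre.2.1
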